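-- pv_equiv track=rewrite | github.com/pysudoku/sudoku | src/sudoku/algorithm/backtracking.py | imprime
-- ===== SOURCE A (Python) =====
-- def imprime(sudoku, asignadas):
--     """imprime is a function to display and asign the sudoku solved
--
--     @param dict_result: will contain the sudoku solved in a dictionary structure
--     @param sudoku:
--     @param asignadas:
--
--     @return: a dictionary with the sudoku solved where the Key is the Row and column of sudokugame and Value is the number asigned to solve sudoku
--     """
--     dict_result = {}
--     for fila in range(0,len(sudoku)):
--         cadena = ""
--         for columna in range(0,len(sudoku)):
--             if sudoku[fila][columna] == 0:
--                 encontrado = False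
--                 for a in asignadas:
--                     if a[0] == fila and a[1] == columna:
--                         dict_result[chr(fila+65) + str(columna+1)] = str(a[2])
--                         cadena +=  str(a[2])
--                         encontrado = True
--                 if not encontrado:
--                     cadena += ""
--             else:
--                 cadena += str(sudoku[fila][columna])
--                 dict_result[chr(fila+65) + str(columna+1)] = str(sudoku[fila][columna])
--
--     return dict_result
-- ===== SOURCE B (Python) =====
-- def imprime(sudoku, asignadas):
--     n = len(sudoku)
--     # materialize the solved grid: copy with None for empty cells,
--     # then apply the assignments onto it (last one wins)
--     solved = [[v if v != 0 else None for v in row] for row in sudoku]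
--     for r, c, v in asignadas:
--         if 0 <= r < n and 0 <= c < n and sudoku[r][c] == 0:
--             solved[r][c] = v
--     # format the solved grid into the result dictionary
--     dict_result = {}
--     for f in range(n):
--         for c in range(n):
--             w = solved[f][c]
--             if w is not None:
--                 dict_result[chr(f + 65) + str(c + 1)] = str(w)
--     return dict_result
-- ===== Notes on version B (the rewrite author's own statement) =====
-- stated objective: alternative
-- what changed: B first materializes the solved grid (a copy of sudoku with the assignments applied in place to empty cells), then formats that grid into the dictionary in one pass, instead of A's nested grid loop that rescans the whole assignment list inside every empty cell.
import Mathlib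
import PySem

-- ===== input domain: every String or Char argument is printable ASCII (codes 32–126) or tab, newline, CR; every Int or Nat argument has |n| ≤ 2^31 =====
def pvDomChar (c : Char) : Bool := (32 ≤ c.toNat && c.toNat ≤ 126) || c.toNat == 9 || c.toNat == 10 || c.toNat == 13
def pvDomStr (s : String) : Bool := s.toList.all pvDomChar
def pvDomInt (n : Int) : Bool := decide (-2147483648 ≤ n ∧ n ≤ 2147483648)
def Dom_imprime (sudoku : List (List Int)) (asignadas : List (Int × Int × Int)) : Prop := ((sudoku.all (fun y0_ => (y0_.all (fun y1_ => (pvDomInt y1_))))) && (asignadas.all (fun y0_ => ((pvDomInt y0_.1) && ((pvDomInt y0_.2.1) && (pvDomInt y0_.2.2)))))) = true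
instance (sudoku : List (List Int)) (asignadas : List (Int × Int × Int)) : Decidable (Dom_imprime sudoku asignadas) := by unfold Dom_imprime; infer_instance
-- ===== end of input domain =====

-- B first materializes the solved grid (copy of sudoku with assignments applied to empty
-- cells), then formats that grid in one pass, instead of A's nested grid loop that rescans
-- the assignment list inside every empty cell (objective: alternative; return value only).

-- key "chr(fila+65) + str(columna+1)" (shared pure formatting helper of both ports)
def pvCell (fila columna : Nat) : String :=
  String.ofList (Char.ofNat (fila + 65) :: PySem.Int.toChars ((columna : Int) + 1))

-- ===== PORT A =====
-- inner 'for a in asignadas' loop; state = (dict_result, cadena, encontrado)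
def pvStepA (fila columna : Nat) (st : PySem.Dict String String × String × Bool)
    (a : Int × Int × Int) : PySem.Dict String String × String × Bool :=
  if a.1 = (fila : Int) ∧ a.2.1 = (columna : Int) then
    (st.1.insert (pvCell fila columna) (PySem.Int.toStr a.2.2),
     st.2.1 ++ PySem.Int.toStr a.2.2, true)
  else st

def imprime (sudoku : List (List Int)) (asignadas : List (Int × Int × Int)) : List (String × String) :=
  -- range(0, len(sudoku)) indices are Nat here; sudoku[fila][columna] is in range under Pre_,
  -- so List.getD is exact Python indexing there
  ((List.range sudoku.length).foldl (fun (d : PySem.Dict String String) fila =>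
    ((List.range sudoku.length).foldl
      (fun (p : PySem.Dict String String × String) columna =>
        let v := (sudoku.getD fila []).getD columna 0
        if v = 0 then
          let q := asignadas.foldl (pvStepA fila columna) (p.1, p.2, false)
          -- 'if not encontrado: cadena += ""' is a no-op
          (q.1, q.2.1)
        else
          (p.1.insert (pvCell fila columna) (PySem.Int.toStr v),
           p.2 ++ PySem.Int.toStr v))
      (d, "")).1) PySem.Dict.empty).items

-- ===== PORT B =====
-- 'if 0 <= r < n and 0 <= c < n and sudoku[r][c] == 0: solved[r][c] = v'
-- (the guard makes the toNat indices exact; sudoku[r][c] is in range under Pre_)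
def pvStepB (sudoku : List (List Int)) (n : Nat) (g : List (List (Option Int)))
    (a : Int × Int × Int) : List (List (Option Int)) :=
  if 0 ≤ a.1 ∧ a.1 < (n : Int) ∧ 0 ≤ a.2.1 ∧ a.2.1 < (n : Int) ∧
      (sudoku.getD a.1.toNat []).getD a.2.1.toNat 0 = 0 then
    g.set a.1.toNat ((g.getD a.1.toNat []).set a.2.1.toNat (some a.2.2))
  else g

def imprime_alt (sudoku : List (List Int)) (asignadas : List (Int × Int × Int)) : List (String × String) :=
  let n := sudoku.length
  let solved0 := sudoku.map (fun row => row.map (fun v => if v ≠ 0 then some v else none))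
  let solved := asignadas.foldl (pvStepB sudoku n) solved0
  ((List.range n).foldl (fun (d : PySem.Dict String String) f =>
    (List.range n).foldl (fun (d : PySem.Dict String String) c =>
      match (solved.getD f []).getD c none with
      | some w => d.insert (pvCell f c) (PySem.Int.toStr w)
      | none => d) d) PySem.Dict.empty).items

-- ===== PRECONDITION & SPEC =====
-- A indexes sudoku[fila][columna] for all fila, columna < len(sudoku): rows shorter than the
-- grid raise IndexError in A (and in B), so they are excluded.
def Pre_imprime (sudoku : List (List Int)) (asignadas : List (Int × Int × Int)) : Prop :=
  ∀ row ∈ sudoku, sudoku.length ≤ row.length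
instance (sudoku : List (List Int)) (asignadas : List (Int × Int × Int)) : Decidable (Pre_imprime sudoku asignadas) := by unfold Pre_imprime; infer_instance

def pvWitness_imprime : List (List Int) × (List (Int × Int × Int)) :=
  ([[1, 0], [0, 2]], [(0, 1, 3), (1, 0, 4)])

def Spec_imprime (sudoku : List (List Int)) (asignadas : List (Int × Int × Int)) (out : List (String × String)) : Prop := out = imprime_alt sudoku asignadas
instance (sudoku : List (List Int)) (asignadas : List (Int × Int × Int)) (out : List (String × String)) : Decidable (Spec_imprime sudoku asignadas out) := by unfold Spec_imprime; infer_instance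

-- ===== CLAIM (what is proved, stated in full; the proofs are below) =====
def Claim_equal_imprime : Prop := ∀ (sudoku : List (List Int)) (asignadas : List (Int × Int × Int)), Dom_imprime sudoku asignadas → Pre_imprime sudoku asignadas → Spec_imprime sudoku asignadas (imprime sudoku asignadas)

-- ===== LEMMAS AND PROOFS =====

-- the last assignment matching cell (fila, columna), if any
def pvLast (fila columna : Nat) (l : List (Int × Int × Int)) : Option Int :=
  l.foldl (fun acc a => if a.1 = (fila : Int) ∧ a.2.1 = (columna : Int) then some a.2.2 else acc) none

lemma pvLast_append (fila columna : Nat) (l : List (Int × Int × Int)) (a : Int × Int × Int) :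
    pvLast fila columna (l ++ [a]) =
      if a.1 = (fila : Int) ∧ a.2.1 = (columna : Int) then some a.2.2
      else pvLast fila columna l := by
  simp [pvLast, List.foldl_append]

-- A's inner assignment loop, projected to the dict, realises "insert the last match (if any)"
lemma foldl_stepA_fst (fila columna : Nat) (l : List (Int × Int × Int))
    (st : PySem.Dict String String × String × Bool) :
    (l.foldl (pvStepA fila columna) st).1 =
      match pvLast fila columna l with
      | some w => st.1.insert (pvCell fila columna) (PySem.Int.toStr w)
      | none => st.1 := by
  induction l using List.reverseRecOn generalizing st with
  | nil => simp [pvLast]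
  | append_singleton l a ih =>
    rw [List.foldl_append, pvLast_append]
    by_cases h : a.1 = (fila : Int) ∧ a.2.1 = (columna : Int)
    · simp only [List.foldl, pvStepA, h]
      rcases hl : pvLast fila columna l with _ | w <;> simp [ih, hl, PySem.Dict.insert_insert_self]
    · simp only [List.foldl, pvStepA, if_neg h]
      exact ih st

-- B's assignment pass preserves the grid's outer length
lemma foldl_stepB_length (sudoku : List (List Int)) (n : Nat)
    (l : List (Int × Int × Int)) (g : List (List (Option Int))) :
    (l.foldl (pvStepB sudoku n) g).length = g.length := by
  induction l generalizing g with
  | nil => rfl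
  | cons a l ih =>
    simp only [List.foldl]
    rw [ih]
    unfold pvStepB
    split <;> simp

-- … and each row's length
lemma foldl_stepB_rowlength (sudoku : List (List Int)) (n : Nat)
    (l : List (Int × Int × Int)) (g : List (List (Option Int))) (i : Nat) :
    ((l.foldl (pvStepB sudoku n) g).getD i []).length = (g.getD i []).length := by
  induction l generalizing g with
  | nil => rfl
  | cons a l ih =>
    simp only [List.foldl]
    rw [ih]
    unfold pvStepB
    split
    · rcases Nat.lt_or_ge a.1.toNat g.length with hr | hr
      · by_cases hi : a.1.toNat = i
        · subst hi
          simp [List.getD, hr]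
        · simp [List.getD, List.getElem?_set_ne hi]
      · rw [List.set_eq_of_length_le hr]
    · rfl

-- reading the cell (f, c) after B's assignment pass
lemma foldl_stepB_read (sudoku : List (List Int)) (n : Nat)
    (l : List (Int × Int × Int)) (g : List (List (Option Int)))
    (f c : Nat) (hf : f < n) (hc : c < n)
    (hg : g.length = n) (hrow : n ≤ (g.getD f []).length) :
    ((l.foldl (pvStepB sudoku n) g).getD f []).getD c none =
      if (sudoku.getD f []).getD c 0 = 0 then
        match pvLast f c l with
        | some w => some w
        | none => (g.getD f []).getD c none
      else (g.getD f []).getD c none := by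
  induction l using List.reverseRecOn generalizing g with
  | nil =>
    simp [pvLast]
  | append_singleton l a ih =>
    rw [List.foldl_append, pvLast_append]
    simp only [List.foldl]
    set g' := l.foldl (pvStepB sudoku n) g with hg'
    have hg'len : g'.length = n := by rw [hg', foldl_stepB_length, hg]
    have hg'row : ∀ i, (g'.getD i []).length = (g.getD i []).length := by
      intro i; rw [hg', foldl_stepB_rowlength]
    unfold pvStepB
    by_cases hguard : 0 ≤ a.1 ∧ a.1 < (n : Int) ∧ 0 ≤ a.2.1 ∧ a.2.1 < (n : Int) ∧
        (sudoku.getD a.1.toNat []).getD a.2.1.toNat 0 = 0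
    · rw [if_pos hguard]
      obtain ⟨h1, h2, h3, h4, h5⟩ := hguard
      by_cases hmatch : a.1 = (f : Int) ∧ a.2.1 = (c : Int)
      · -- the appended assignment writes exactly cell (f, c)
        obtain ⟨hm1, hm2⟩ := hmatch
        have hfr : a.1.toNat = f := by omega
        have hcc : a.2.1.toNat = c := by omega
        have hcell0 : (sudoku.getD f []).getD c 0 = 0 := by rw [← hfr, ← hcc]; exact h5
        have hfl : f < g'.length := by omega
        have hcl : c < (g'.getD f []).length := by rw [hg'row]; omega
        rw [hfr, hcc]
        simp only [List.getD]
        rw [List.getElem?_set_self (show f < g'.length by omega), Option.getD_some,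
          List.getElem?_set_self (show c < (g'[f]?.getD []).length from hcl), Option.getD_some]
        have hcell0' : (sudoku[f]?.getD [])[c]?.getD 0 = 0 := by
          simpa [List.getD] using hcell0
        simp [hcell0', hm1, hm2]
      · -- the appended assignment writes some other cell (or none): reading is unchanged
        have hread : ((g'.set a.1.toNat ((g'.getD a.1.toNat []).set a.2.1.toNat
            (some a.2.2))).getD f []).getD c none = (g'.getD f []).getD c none := by
          by_cases hfr : a.1.toNat = f
          · have hcc : a.2.1.toNat ≠ c := by
              intro h; apply hmatch; constructor <;> omega
            have hfl : f < g'.length := by omega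
            simp only [List.getD]
            rw [hfr, List.getElem?_set_self hfl, Option.getD_some,
              List.getElem?_set_ne hcc]
          · simp only [List.getD]
            rw [List.getElem?_set_ne hfr]
        rw [hread, ih g hg hrow]
        have hnm : ¬ (a.1 = (f : Int) ∧ a.2.1 = (c : Int)) := hmatch
        rw [if_neg hnm]
    · rw [if_neg hguard, ih g hg hrow]
      by_cases hcell : (sudoku.getD f []).getD c 0 = 0
      · have hnm : ¬ (a.1 = (f : Int) ∧ a.2.1 = (c : Int)) := by
          intro ⟨hm1, hm2⟩
          apply hguard
          refine ⟨by omega, by omega, by omega, by omega, ?_⟩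
          have hfr : a.1.toNat = f := by omega
          have hcc : a.2.1.toNat = c := by omega
          rw [hfr, hcc]; exact hcell
        rw [if_pos hcell, if_pos hcell, if_neg hnm]
      · rw [if_neg hcell, if_neg hcell]

-- the initial solved grid reads back the sudoku cell (None for empty)
lemma solved0_read (sudoku : List (List Int)) (f c : Nat)
    (hf : f < sudoku.length) (hc : c < (sudoku.getD f []).length) :
    (((sudoku.map (fun row => row.map (fun v => if v ≠ 0 then some v else none))).getD f []).getD c none) =
      (if (sudoku.getD f []).getD c 0 ≠ 0 then some ((sudoku.getD f []).getD c 0) else none) := by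
  have hrow : sudoku[f]? = some sudoku[f] := List.getElem?_eq_getElem hf
  have hc' : c < sudoku[f].length := by
    simpa [List.getD, hrow] using hc
  have hcell : sudoku[f][c]? = some sudoku[f][c] := List.getElem?_eq_getElem hc'
  simp [List.getD, List.getElem?_map, hrow, hcell]

-- the per-cell value both programs realise
def pvCellVal (sudoku : List (List Int)) (asignadas : List (Int × Int × Int))
    (f c : Nat) : Option Int :=
  let v := (sudoku.getD f []).getD c 0
  if v = 0 then pvLast f c asignadas else some v

-- under Pre_, B's solved grid reads back pvCellVal at every in-range cell
lemma solved_read (sudoku : List (List Int)) (asignadas : List (Int × Int × Int))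
    (hPre : ∀ row ∈ sudoku, sudoku.length ≤ row.length)
    (f c : Nat) (hf : f < sudoku.length) (hc : c < sudoku.length) :
    ((asignadas.foldl (pvStepB sudoku sudoku.length)
        (sudoku.map (fun row => row.map (fun v => if v ≠ 0 then some v else none)))).getD f []).getD c none =
      pvCellVal sudoku asignadas f c := by
  have hrowlen' : sudoku.length ≤ sudoku[f].length := hPre _ (List.getElem_mem hf)
  have hrowlen : sudoku.length ≤ (sudoku.getD f []).length := by
    simpa [List.getD, List.getElem?_eq_getElem hf] using hrowlen'
  have hrow0 : sudoku.length ≤ ((sudoku.map (fun row => row.map (fun v => if v ≠ 0 then some v else none))).getD f []).length := by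
    have h1 : (sudoku.map (fun row => row.map (fun v => if v ≠ 0 then some v else none)))[f]? =
        some (sudoku[f].map (fun v => if v ≠ 0 then some v else none)) := by
      rw [List.getElem?_map, List.getElem?_eq_getElem hf]; rfl
    rw [List.getD, h1, Option.getD_some, List.length_map]
    exact hrowlen'
  rw [foldl_stepB_read sudoku sudoku.length asignadas _ f c hf hc (by simp) hrow0,
    solved0_read sudoku f c hf (by omega)]
  unfold pvCellVal
  simp only [List.getD]
  by_cases hcell : (sudoku[f]?.getD [])[c]?.getD 0 = 0
  · rcases pvLast f c asignadas with _ | w <;> simp [hcell]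
  · simp [hcell]

-- A's double loop equals the canonical "insert pvCellVal when present" double loop
lemma rowA_eq (sudoku : List (List Int)) (asignadas : List (Int × Int × Int)) (fila : Nat)
    (cols : List Nat) (p : PySem.Dict String String × String) :
    (cols.foldl
      (fun (p : PySem.Dict String String × String) columna =>
        let v := (sudoku.getD fila []).getD columna 0
        if v = 0 then
          let q := asignadas.foldl (pvStepA fila columna) (p.1, p.2, false)
          (q.1, q.2.1)
        else
          (p.1.insert (pvCell fila columna) (PySem.Int.toStr v),
           p.2 ++ PySem.Int.toStr v)) p).1 =
    cols.foldl
      (fun (d : PySem.Dict String String) columna =>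
        match pvCellVal sudoku asignadas fila columna with
        | some w => d.insert (pvCell fila columna) (PySem.Int.toStr w)
        | none => d) p.1 := by
  induction cols generalizing p with
  | nil => rfl
  | cons c cs ih =>
    simp only [List.foldl]
    rw [ih]
    congr 1
    unfold pvCellVal
    by_cases hv : (sudoku.getD fila []).getD c 0 = 0
    · simp only [hv, foldl_stepA_fst]
      rcases pvLast fila c asignadas <;> rfl
    · simp only [if_neg hv]

lemma outerA_eq (sudoku : List (List Int)) (asignadas : List (Int × Int × Int))
    (cols rows : List Nat) (d : PySem.Dict String String) :
    rows.foldl (fun (d : PySem.Dict String String) fila =>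
      (cols.foldl
        (fun (p : PySem.Dict String String × String) columna =>
          let v := (sudoku.getD fila []).getD columna 0
          if v = 0 then
            let q := asignadas.foldl (pvStepA fila columna) (p.1, p.2, false)
            (q.1, q.2.1)
          else
            (p.1.insert (pvCell fila columna) (PySem.Int.toStr v),
             p.2 ++ PySem.Int.toStr v)) (d, "")).1) d =
    rows.foldl (fun (d : PySem.Dict String String) fila =>
      cols.foldl
        (fun (d : PySem.Dict String String) columna =>
          match pvCellVal sudoku asignadas fila columna with
          | some w => d.insert (pvCell fila columna) (PySem.Int.toStr w)
          | none => d) d) d := by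
  induction rows generalizing d with
  | nil => rfl
  | cons r rs ih =>
    simp only [List.foldl]
    rw [rowA_eq]
    exact ih _

-- ===== VERDICT (by name: the statement is the Claim_ definition above) =====
theorem imprime_spec : Claim_equal_imprime := by
  intro sudoku asignadas _hDom hPre
  unfold Spec_imprime imprime imprime_alt
  apply congrArg PySem.Dict.items
  rw [outerA_eq]
  apply PySem.List.foldl_congr_mem
  intro d f hf
  apply PySem.List.foldl_congr_mem
  intro d' c hc
  rw [solved_read sudoku asignadas hPre f c (List.mem_range.mp hf) (List.mem_range.mp hc)]
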